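-- pv_equiv track=rewrite | github.com/owYuriGG/Laboratorio-de-Altoritmos-2 | semana02/ExerciciosParaEntregar/desafio.py | group_intervals
-- ===== SOURCE A (Python) =====
-- def group_intervals(list):
--     list.sort()
--     intervals = []
--     start = list[0]
--     end = list[0]
--
--     for index in list[1:]:
--         if index == end + 1:
--             end = index
--         else:
--             if start == end:
--                 intervals.append(f"[{start}]")
--             else:
--                 intervals.append(f"[{start}-{end}]")
--             start = index
--             end = index
--
--     if start == end:
--         intervals.append(f"[{start}]")
--     else:
--         intervals.append(f"[{start}-{end}]")
--
--     return intervals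
-- ===== SOURCE B (Python) =====
-- def group_intervals(list):
--     list.sort()
--     runs = []
--     for x in list:
--         if runs and x == runs[-1][-1] + 1:
--             runs[-1].append(x)
--         else:
--             runs.append([x])
--     return [f"[{r[0]}]" if len(r) == 1 else f"[{r[0]}-{r[-1]}]" for r in runs]
-- ===== Notes on version B (the rewrite author's own statement) =====
-- stated objective: alternative
-- what changed: B replaces A's single-pass start/end accumulator with a two-phase decomposition: first group the sorted list into runs of consecutive integers, then format each run in a separate pass.
-- crash fix: On the empty list A raises IndexError (it reads the first element before looping); B naturally returns the empty list. — e.g. on group_intervals([]): A raises IndexError, B returns []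
import Mathlib
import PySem

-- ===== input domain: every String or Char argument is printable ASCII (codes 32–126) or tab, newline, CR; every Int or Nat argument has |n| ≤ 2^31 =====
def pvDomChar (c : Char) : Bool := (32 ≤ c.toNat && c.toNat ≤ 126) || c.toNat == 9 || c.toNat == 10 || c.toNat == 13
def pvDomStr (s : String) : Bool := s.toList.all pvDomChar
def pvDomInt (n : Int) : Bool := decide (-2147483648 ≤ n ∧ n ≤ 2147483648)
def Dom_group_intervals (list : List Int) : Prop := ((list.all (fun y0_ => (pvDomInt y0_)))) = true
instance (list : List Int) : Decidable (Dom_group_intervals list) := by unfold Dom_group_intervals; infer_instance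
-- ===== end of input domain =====

-- B replaces A's single-pass start/end accumulator with a two-phase group-then-format
-- decomposition (same cost); both Pythons sort the argument in place (return value proved equal).


-- ===== PORT A =====
-- formatting used by A's two append sites: f"[{s}]" / f"[{s}-{e}]"
def fmtA (s e : Int) : String :=
  if s = e then "[" ++ PySem.Int.toStr s ++ "]"
  else "[" ++ PySem.Int.toStr s ++ "-" ++ PySem.Int.toStr e ++ "]"

def stepA (st : List String × Int × Int) (index : Int) : List String × Int × Int :=
  if index = st.2.2 + 1 then (st.1, st.2.1, index)
  else (st.1 ++ [fmtA st.2.1 st.2.2], index, index)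

def group_intervals (list : List Int) : List String :=
  match PySem.List.sorted list (fun x => x) false with
  | [] => []   -- unreachable under Pre_: Python raises IndexError at list[0]
  | x :: rest =>
    let st := rest.foldl stepA ([], x, x)
    st.1 ++ [fmtA st.2.1 st.2.2]

-- ===== PORT B =====
-- extend the last run if x is consecutive with its last element, else open a new run
def addRun (runs : List (List Int)) (x : Int) : List (List Int) :=
  match runs.getLast? with
  | none => runs ++ [[x]]
  | some r =>
    match r.getLast? with
    | none => runs ++ [[x]]
    | some last => if x = last + 1 then runs.dropLast ++ [r ++ [x]] else runs ++ [[x]]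

-- f"[{r[0]}]" if len(r) == 1 else f"[{r[0]}-{r[-1]}]"
def fmtRun (r : List Int) : String :=
  match r with
  | [] => ""   -- unreachable: runs are nonempty
  | h :: _ =>
    if r.length = 1 then "[" ++ PySem.Int.toStr h ++ "]"
    else "[" ++ PySem.Int.toStr h ++ "-" ++ PySem.Int.toStr (r.getLastD h) ++ "]"

def group_intervals_alt (list : List Int) : List String :=
  let runs := (PySem.List.sorted list (fun x => x) false).foldl addRun []
  runs.map fmtRun

-- ===== PRECONDITION & SPEC =====
-- Pre_ excludes only the empty list, on which A raises IndexError reading the first element.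
def Pre_group_intervals (list : List Int) : Prop := list ≠ []
instance (list : List Int) : Decidable (Pre_group_intervals list) := by unfold Pre_group_intervals; infer_instance
def pvWitness_group_intervals : List Int := ([3, 1, 2, 7])

-- On the empty list A raises IndexError reading the first element; B naturally returns the empty list.
def Raises_group_intervals (list : List Int) : Prop := list = []
instance (list : List Int) : Decidable (Raises_group_intervals list) := by unfold Raises_group_intervals; infer_instance
def pvRaiseWitness_group_intervals : List Int := ([])
def pvRaiseWitnessOut_group_intervals : List String := []

def Spec_group_intervals (list : List Int) (out : List String) : Prop := out = group_intervals_alt list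
instance (list : List Int) (out : List String) : Decidable (Spec_group_intervals list out) := by unfold Spec_group_intervals; infer_instance

-- ===== CLAIM (what is proved, stated in full; the proofs are below) =====
def Claim_equal_group_intervals : Prop := ∀ (list : List Int), Dom_group_intervals list → Pre_group_intervals list → Spec_group_intervals list (group_intervals list)
def Claim_raises_group_intervals : Prop := (∀ (list : List Int), Dom_group_intervals list → Raises_group_intervals list → ¬ Pre_group_intervals list) ∧ (Dom_group_intervals (pvRaiseWitness_group_intervals) ∧ Raises_group_intervals (pvRaiseWitness_group_intervals) ∧ group_intervals_alt (pvRaiseWitness_group_intervals) = pvRaiseWitnessOut_group_intervals)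

-- ===== LEMMAS AND PROOFS =====

-- a run r with head s, last e, s ≤ e and (singleton ↔ s = e) formats exactly as A formats (s, e)
theorem fmtRun_eq_fmtA (r : List Int) (s e : Int)
    (hh : r.head? = some s) (hl : r.getLast? = some e)
    (h1 : r.length = 1 ↔ s = e) : fmtRun r = fmtA s e := by
  cases r with
  | nil => simp at hh
  | cons h t =>
    have hhs : h = s := by simpa using hh
    subst hhs
    by_cases hse : h = e
    · have hlen : (h :: t).length = 1 := h1.mpr hse
      have ht : t = [] := by
        simpa [List.length_eq_zero_iff] using hlen
      subst ht
      simp [fmtRun, fmtA, hse]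
    · have hlen : t ≠ [] := by
        intro hc; subst hc
        exact hse (h1.mp (by simp))
      have hlast : (h :: t).getLastD h = e := by
        rw [List.getLastD_eq_getLast?, hl]; rfl
      have hlen1 : (h :: t).length ≠ 1 := fun hc => hse (h1.mp hc)
      simp only [fmtRun, fmtA, hlen1, if_false, hse, hlast]

theorem fold_invariant (rest : List Int) (acc : List (List Int)) (r : List Int) (s e : Int)
    (hh : r.head? = some s) (hl : r.getLast? = some e) (hse : s ≤ e)
    (h1 : r.length = 1 ↔ s = e) :
    (let st := rest.foldl stepA (acc.map fmtRun, s, e)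
     st.1 ++ [fmtA st.2.1 st.2.2]) = (rest.foldl addRun (acc ++ [r])).map fmtRun := by
  induction rest generalizing acc r s e with
  | nil =>
    simp only [List.foldl_nil, List.map_append, List.map_cons, List.map_nil]
    rw [fmtRun_eq_fmtA r s e hh hl h1]
  | cons x rest ih =>
    have hr : r ≠ [] := by intro hc; subst hc; simp at hh
    have hlastacc : (acc ++ [r]).getLast? = some r := by simp
    simp only [List.foldl_cons]
    by_cases hx : x = e + 1
    · have hstep : stepA (acc.map fmtRun, s, e) x = (acc.map fmtRun, s, x) := by
        simp [stepA, hx]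
      have hadd : addRun (acc ++ [r]) x = acc ++ [r ++ [x]] := by
        simp [addRun, hlastacc, hl, hx]
      rw [hstep, hadd]
      apply ih acc (r ++ [x]) s x
      · cases r with
        | nil => exact absurd rfl hr
        | cons a b => simpa using hh
      · simp
      · omega
      · constructor
        · intro hc
          simp only [List.length_append, List.length_cons, List.length_nil] at hc
          have : r = [] := List.length_eq_zero_iff.mp (by omega)
          exact absurd this hr
        · intro hc; omega
    · have hstep : stepA (acc.map fmtRun, s, e) x = (acc.map fmtRun ++ [fmtA s e], x, x) := by
        simp [stepA, hx]
      have hadd : addRun (acc ++ [r]) x = (acc ++ [r]) ++ [[x]] := by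
        simp [addRun, hlastacc, hl, hx]
      rw [hstep, hadd]
      have := ih (acc ++ [r]) [x] x x (by simp) (by simp) le_rfl (by simp)
      rw [← this]
      simp [fmtRun_eq_fmtA r s e hh hl h1]

-- ===== VERDICT (by name: the statement is the Claim_ definition above) =====
theorem group_intervals_spec : Claim_equal_group_intervals := by
  intro list _ hpre
  unfold Spec_group_intervals group_intervals group_intervals_alt
  have hs : PySem.List.sorted list (fun x => x) false ≠ [] := by
    rw [Ne, PySem.List.sorted_eq_nil_iff]; exact hpre
  cases hsort : PySem.List.sorted list (fun x => x) false with
  | nil => exact absurd hsort hs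
  | cons x rest =>
    simp only [List.foldl_cons]
    have haddnil : addRun [] x = [[x]] := by simp [addRun]
    rw [haddnil]
    have := fold_invariant rest [] [x] x x (by simp) (by simp) le_rfl (by simp)
    simpa using this

theorem group_intervals_raises : Claim_raises_group_intervals := by
  unfold Claim_raises_group_intervals
  exact ⟨fun list _ hr hp => hp hr, by decide⟩

-- self-check: the raises witness value re-stated from group_intervals_raises
theorem group_intervals_raises_witness_ok :
    group_intervals_alt pvRaiseWitness_group_intervals = pvRaiseWitnessOut_group_intervals :=
  group_intervals_raises.2.2.2
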